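-- pv_equiv track=rewrite | github.com/iuoqu/metromapme-vectorize | scripts/extract_v2.py | _sort_line_ids
-- ===== SOURCE A (Python) =====
-- from typing import Iterable
--
-- def _sort_line_ids(ids: Iterable[str]) -> list[str]:
--     nums, names = [], []
--     for x in ids:
--         if x.isdigit():
--             nums.append(x)
--         else:
--             names.append(x)
--     return sorted(nums, key=int) + sorted(names)
-- ===== SOURCE B (Python) =====
-- def _sort_line_ids(ids):
--     # One stable sort with a composite key instead of partition + two sorts + concat:
--     # numeric ids get tag 0 (ordered by int value), name ids tag 1 (ordered lexicographically);
--     # the uniform (int, int, str) triple keeps tuple comparison well-typed, and stability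
--     # preserves the original order of ties exactly as the two separate sorts do.
--     return sorted(ids, key=lambda x: (0, int(x), "") if x.isdigit() else (1, 0, x))
-- ===== Notes on version B (the rewrite author's own statement) =====
-- stated objective: idiomatic
-- what changed: Replaced the two-bucket partition followed by two separate sorts and a concatenation with a single stable sorted() call over a composite (tag, int-value, string) key; stability reproduces the original tie order.
import Mathlib
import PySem

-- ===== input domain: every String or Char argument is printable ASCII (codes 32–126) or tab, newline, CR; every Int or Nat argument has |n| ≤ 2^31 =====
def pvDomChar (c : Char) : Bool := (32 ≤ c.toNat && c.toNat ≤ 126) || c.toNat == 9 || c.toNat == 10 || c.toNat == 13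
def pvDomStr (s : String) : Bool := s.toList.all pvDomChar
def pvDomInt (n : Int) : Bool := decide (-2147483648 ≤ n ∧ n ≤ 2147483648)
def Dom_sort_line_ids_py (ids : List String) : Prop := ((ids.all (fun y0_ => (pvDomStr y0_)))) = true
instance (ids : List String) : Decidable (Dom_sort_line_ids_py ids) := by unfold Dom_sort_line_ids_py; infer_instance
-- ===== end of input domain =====

-- B replaces A's partition + two sorts + concatenation by ONE stable sort with a composite
-- (tag, int-value, string) key (objective: idiomatic).  Return-value equivalence only; neither
-- program mutates its argument.

-- int(x), applied by both programs only to isdigit strings, where int() always succeeds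
-- (so the getD 0 default is never the value used).
def pvIntKey (x : String) : Int := (PySem.Int.ofStr? x).getD 0

-- ===== PORT A =====
def sort_line_ids_py (ids : List String) : List String :=
  -- nums, names = [], []; for x in ids: append to one bucket
  let p := ids.foldl
    (fun (st : List String × List String) x =>
      if PySem.Str.strIsdigit x then (st.1 ++ [x], st.2) else (st.1, st.2 ++ [x]))
    ([], [])
  PySem.List.sorted p.1 pvIntKey ++ PySem.List.sorted p.2 (fun x => x)

-- ===== PORT B =====
-- key(x) = (0, int(x), "") if x.isdigit() else (1, 0, x)
def pvKey (x : String) : Int × Int × String :=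
  if PySem.Str.strIsdigit x then (0, pvIntKey x, "") else (1, 0, x)

-- Python's '<' on the key triples, written out componentwise-lexicographically
-- (exactly as PySem.List.sorted2 does for pairs; PySem has no sorted3).
def pvKeyLt (a b : String) : Bool :=
  let ka := pvKey a
  let kb := pvKey b
  decide (ka.1 < kb.1) ||
    (ka.1 == kb.1 && (decide (ka.2.1 < kb.2.1) ||
      (ka.2.1 == kb.2.1 && decide (ka.2.2 < kb.2.2))))

-- sorted(ids, key=…) : PySem.List.sorted IS this foldl of insertBy
-- (PySem.List.sorted_eq_foldl_insertBy, rfl); written this way because the key is a triple.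
def sort_line_ids_py_alt (ids : List String) : List String :=
  ids.foldl (fun acc x => PySem.List.insertBy pvKeyLt x acc) []

-- ===== PRECONDITION & SPEC =====
def Spec_sort_line_ids_py (ids : List String) (out : List String) : Prop := out = sort_line_ids_py_alt ids
instance (ids : List String) (out : List String) : Decidable (Spec_sort_line_ids_py ids out) := by unfold Spec_sort_line_ids_py; infer_instance

-- ===== CLAIM (what is proved, stated in full; the proofs are below) =====
def Claim_equal_sort_line_ids_py : Prop := ∀ (ids : List String), Dom_sort_line_ids_py ids → Spec_sort_line_ids_py ids (sort_line_ids_py ids)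

-- ===== LEMMAS AND PROOFS =====

theorem pvKeyLt_digit_digit (a b : String) (ha : PySem.Str.strIsdigit a = true)
    (hb : PySem.Str.strIsdigit b = true) :
    pvKeyLt a b = decide (pvIntKey a < pvIntKey b) := by
  simp only [PySem.Str.strIsdigit] at ha hb
  simp [pvKeyLt, pvKey, ha, hb]

theorem pvKeyLt_digit_name (a b : String) (ha : PySem.Str.strIsdigit a = true)
    (hb : PySem.Str.strIsdigit b = false) : pvKeyLt a b = true := by
  simp only [PySem.Str.strIsdigit] at ha hb
  simp [pvKeyLt, pvKey, ha, hb]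

theorem pvKeyLt_name_digit (a b : String) (ha : PySem.Str.strIsdigit a = false)
    (hb : PySem.Str.strIsdigit b = true) : pvKeyLt a b = false := by
  simp only [PySem.Str.strIsdigit] at ha hb
  simp [pvKeyLt, pvKey, ha, hb]

theorem pvKeyLt_name_name (a b : String) (ha : PySem.Str.strIsdigit a = false)
    (hb : PySem.Str.strIsdigit b = false) : pvKeyLt a b = decide (a < b) := by
  simp only [PySem.Str.strIsdigit] at ha hb
  simp [pvKeyLt, pvKey, ha, hb]

theorem pvInsertBy_congr {α : Type} (f g : α → α → Bool) (x : α) (l : List α)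
    (h : ∀ y ∈ l, f x y = g x y) :
    PySem.List.insertBy f x l = PySem.List.insertBy g x l := by
  induction l with
  | nil => rfl
  | cons a l ih =>
    simp only [PySem.List.insertBy, h a (by simp)]
    split_ifs with hfa
    · rfl
    · simp only [List.cons.injEq, true_and]
      exact ih (fun y hy => h y (by simp [hy]))

theorem pvInsertBy_append_left {α : Type} (before : α → α → Bool) (x : α) (as bs : List α)
    (h : ∀ b ∈ bs, before x b = true) :
    PySem.List.insertBy before x (as ++ bs) = PySem.List.insertBy before x as ++ bs := by
  induction as with
  | nil =>
    cases bs with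
    | nil => rfl
    | cons b bs' => simp [PySem.List.insertBy, h b (by simp)]
  | cons a as' ih =>
    simp only [List.cons_append, PySem.List.insertBy]
    split_ifs <;> simp [ih]

theorem pvInsertBy_append_right {α : Type} (before : α → α → Bool) (x : α) (as bs : List α)
    (h : ∀ a ∈ as, before x a = false) :
    PySem.List.insertBy before x (as ++ bs) = as ++ PySem.List.insertBy before x bs := by
  induction as with
  | nil => rfl
  | cons a as' ih =>
    simp only [List.cons_append, PySem.List.insertBy, h a (by simp)]
    simp only [Bool.false_eq_true, if_false, List.cons.injEq, true_and]
    exact ih (fun y hy => h y (by simp [hy]))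

theorem pvSorted_append_singleton {α κ : Type} [LT κ] [DecidableLT κ]
    (l : List α) (x : α) (key : α → κ) :
    PySem.List.sorted (l ++ [x]) key =
      PySem.List.insertBy (fun a b => decide (key a < key b)) x (PySem.List.sorted l key) := by
  rw [PySem.List.sorted_eq_foldl_insertBy, PySem.List.sorted_eq_foldl_insertBy,
    List.foldl_append]
  rfl

theorem pvMain (rest : List String) :
    ∀ (nums names : List String),
    (∀ y ∈ nums, PySem.Str.strIsdigit y = true) →
    (∀ y ∈ names, PySem.Str.strIsdigit y = false) →
    rest.foldl (fun acc x => PySem.List.insertBy pvKeyLt x acc)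
        (PySem.List.sorted nums pvIntKey ++ PySem.List.sorted names (fun x => x)) =
      (let p := rest.foldl
          (fun (st : List String × List String) x =>
            if PySem.Str.strIsdigit x then (st.1 ++ [x], st.2) else (st.1, st.2 ++ [x]))
          (nums, names)
       PySem.List.sorted p.1 pvIntKey ++ PySem.List.sorted p.2 (fun x => x)) := by
  induction rest with
  | nil => intro nums names _ _; rfl
  | cons x rest ih =>
    intro nums names hnums hnames
    simp only [List.foldl_cons]
    by_cases hx : PySem.Str.strIsdigit x = true
    · have step :
          PySem.List.insertBy pvKeyLt x
              (PySem.List.sorted nums pvIntKey ++ PySem.List.sorted names (fun x => x)) =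
            PySem.List.sorted (nums ++ [x]) pvIntKey ++ PySem.List.sorted names (fun x => x) := by
        rw [pvInsertBy_append_left pvKeyLt x _ _
            (fun b hb => pvKeyLt_digit_name x b hx
              (hnames b ((PySem.List.mem_sorted names _ false b).mp hb))),
          pvInsertBy_congr pvKeyLt (fun a b => decide (pvIntKey a < pvIntKey b)) x _
            (fun y hy => pvKeyLt_digit_digit x y hx
              (hnums y ((PySem.List.mem_sorted nums _ false y).mp hy))),
          ← pvSorted_append_singleton]
      rw [step, if_pos hx]
      exact ih (nums ++ [x]) names
        (by intro y hy; rcases List.mem_append.mp hy with h | h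
            · exact hnums y h
            · simp at h; subst h; exact hx)
        hnames
    · have hx' : PySem.Str.strIsdigit x = false := by simpa using hx
      have step :
          PySem.List.insertBy pvKeyLt x
              (PySem.List.sorted nums pvIntKey ++ PySem.List.sorted names (fun x => x)) =
            PySem.List.sorted nums pvIntKey ++ PySem.List.sorted (names ++ [x]) (fun x => x) := by
        rw [pvInsertBy_append_right pvKeyLt x _ _
            (fun a hb => pvKeyLt_name_digit x a hx'
              (hnums a ((PySem.List.mem_sorted nums _ false a).mp hb))),
          pvInsertBy_congr pvKeyLt (fun a b => decide (a < b)) x _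
            (fun y hy => pvKeyLt_name_name x y hx'
              (hnames y ((PySem.List.mem_sorted names _ false y).mp hy))),
          ← pvSorted_append_singleton]
      rw [step, if_neg hx]
      exact ih nums (names ++ [x]) hnums
        (by intro y hy; rcases List.mem_append.mp hy with h | h
            · exact hnames y h
            · simp at h; subst h; exact hx')

-- ===== VERDICT (by name: the statement is the Claim_ definition above) =====
theorem sort_line_ids_py_spec : Claim_equal_sort_line_ids_py := by
  intro ids _
  unfold Spec_sort_line_ids_py sort_line_ids_py sort_line_ids_py_alt
  exact (pvMain ids [] [] (by simp) (by simp)).symm
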